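-- pv_equiv track=rewrite | github.com/jackdewinter/pymarkdown | pymarkdown/parser_helper.py | collect_backwards_while_character
-- ===== SOURCE A (Python) =====
-- from typing import Any, List, Optional, Tuple
--
-- def collect_backwards_while_character(
--     source_string: str, end_index: int, match_character: str
-- ) -> Tuple[Optional[int], Optional[int]]:
--     """
--     Collect a sequence of the same character from a given starting point in a
--     string going backwards towards the start of the string.
--
--     Returns the number of characters collected and the index of the first non-matching
--     character and any extracted text in a tuple.
--     """
--
--     source_string_size = len(source_string)
--     if not -1 <= end_index <= source_string_size:
--         return None, None
--     if end_index == -1: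
--         end_index = source_string_size
--
--     index = end_index
--     while index and source_string[index - 1] == match_character:
--         index -= 1
--     return end_index - index, index
-- ===== SOURCE B (Python) =====
-- def collect_backwards_while_character(source_string, end_index, match_character):
--     source_string_size = len(source_string)
--     if not -1 <= end_index <= source_string_size:
--         return None, None
--     if end_index == -1:
--         end_index = source_string_size
--     if len(match_character) == 1:
--         prefix = source_string[:end_index]
--         count = len(prefix) - len(prefix.rstrip(match_character))
--     else:
--         # a multi-character (or empty) match_character can never equal a single char
--         count = 0
--     return count, end_index - count
-- ===== Notes on version B (the rewrite author's own statement) =====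
-- stated objective: idiomatic
-- what changed: Replaces the explicit backward while-loop with a string-library formulation: the run length is len(prefix) - len(prefix.rstrip(match_character)) on the prefix up to end_index, with count = 0 when match_character is not a single character.
import Mathlib
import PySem

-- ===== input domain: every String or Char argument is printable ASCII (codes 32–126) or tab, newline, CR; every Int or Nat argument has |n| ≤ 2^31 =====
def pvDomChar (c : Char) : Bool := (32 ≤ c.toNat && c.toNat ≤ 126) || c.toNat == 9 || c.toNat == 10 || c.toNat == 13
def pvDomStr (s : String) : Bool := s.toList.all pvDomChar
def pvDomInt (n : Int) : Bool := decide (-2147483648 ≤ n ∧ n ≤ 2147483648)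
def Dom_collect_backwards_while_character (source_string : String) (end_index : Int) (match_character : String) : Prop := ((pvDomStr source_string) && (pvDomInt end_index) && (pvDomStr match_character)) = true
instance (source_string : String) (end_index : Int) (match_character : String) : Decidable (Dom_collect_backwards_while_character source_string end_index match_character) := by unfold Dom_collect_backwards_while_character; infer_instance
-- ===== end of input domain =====

-- B replaces A's explicit backward while-loop by the idiomatic pfx/rstrip formulation:
-- count = len(pfx) - len(pfx.rstrip(match_character)) on the pfx up to end_index
-- (count = 0 when match_character is not a single character); return value equivalence is proved on Dom.


-- ===== PORT A =====
-- the `while index and source_string[index - 1] == match_character: index -= 1` loop,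
-- counting down from `i`; the char/string comparison is exact via toList ([c] = mc.toList)
def pvLoopA (cs : List Char) (mcs : List Char) : Nat → Nat
  | 0 => 0
  | i + 1 =>
    if (match cs[i]? with | some c => [c] == mcs | none => false) then pvLoopA cs mcs i
    else i + 1

def collect_backwards_while_character (source_string : String) (end_index : Int) (match_character : String) : Option Int × Option Int :=
  let cs := source_string.toList
  let source_string_size : Int := cs.length
  if -1 ≤ end_index ∧ end_index ≤ source_string_size then
    let e : Int := if end_index = -1 then source_string_size else end_index
    let index : Nat := pvLoopA cs match_character.toList e.toNat
    (some (e - (index : Int)), some (index : Int))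
  else (none, none)

-- ===== PORT B =====
-- hand-port of str.rstrip(chars) (PySem has no chars-argument rstrip): drop trailing
-- characters that occur in `chars`; exact for the code-point strings of Dom
def pvRstripChars (cs : List Char) (chars : List Char) : List Char :=
  (cs.reverse.dropWhile (fun c => c ∈ chars)).reverse

def collect_backwards_while_character_alt (source_string : String) (end_index : Int) (match_character : String) : Option Int × Option Int :=
  let cs := source_string.toList
  let n : Int := cs.length
  if -1 ≤ end_index ∧ end_index ≤ n then
    let e : Int := if end_index = -1 then n else end_index
    let count : Int :=
      if match_character.toList.length = 1 then
        let pfx := cs.take e.toNat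
        (pfx.length : Int) - ((pvRstripChars pfx match_character.toList).length : Int)
      else 0
    (some count, some (e - count))
  else (none, none)

-- ===== PRECONDITION & SPEC =====
def Spec_collect_backwards_while_character (source_string : String) (end_index : Int) (match_character : String) (out : Option Int × Option Int) : Prop := out = collect_backwards_while_character_alt source_string end_index match_character
instance (source_string : String) (end_index : Int) (match_character : String) (out : Option Int × Option Int) : Decidable (Spec_collect_backwards_while_character source_string end_index match_character out) := by unfold Spec_collect_backwards_while_character; infer_instance

-- ===== CLAIM (what is proved, stated in full; the proofs are below) =====
def Claim_equal_collect_backwards_while_character : Prop := ∀ (source_string : String) (end_index : Int) (match_character : String), Dom_collect_backwards_while_character source_string end_index match_character → Spec_collect_backwards_while_character source_string end_index match_character (collect_backwards_while_character source_string end_index match_character)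

-- ===== LEMMAS AND PROOFS =====

-- single-character match: A's loop lands exactly at the length of the rstripped pfx
theorem pvLoopA_single (cs : List Char) (m : Char) :
    ∀ i, i ≤ cs.length →
      pvLoopA cs [m] i = ((cs.take i).reverse.dropWhile (fun c => c ∈ [m])).length := by
  intro i
  induction i with
  | zero => intro _; simp [pvLoopA]
  | succ i ih =>
    intro h
    have hi : i < cs.length := by omega
    have htake : (cs.take (i + 1)).reverse = cs[i] :: (cs.take i).reverse := by
      rw [List.take_add_one]
      simp [List.getElem?_eq_getElem hi]
    rw [pvLoopA, List.getElem?_eq_getElem hi, htake]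
    by_cases hm : cs[i] = m
    · simp [hm, List.dropWhile, ih (by omega)]
    · simp [hm, List.dropWhile, List.length_take, Nat.min_eq_left (le_of_lt hi)]

-- non-single-character match: the loop condition is immediately false
theorem pvLoopA_other (cs : List Char) (mcs : List Char) (h : mcs.length ≠ 1) :
    ∀ i, pvLoopA cs mcs i = i := by
  intro i
  cases i with
  | zero => simp [pvLoopA]
  | succ i =>
    rw [pvLoopA]
    have : (match cs[i]? with | some c => [c] == mcs | none => false) = false := by
      cases hc : cs[i]? with
      | none => rfl
      | some c =>
        rw [beq_eq_false_iff_ne]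
        intro hEq
        exact h (hEq ▸ rfl)
    rw [this]
    simp

-- ===== VERDICT (by name: the statement is the Claim_ definition above) =====
theorem collect_backwards_while_character_spec : Claim_equal_collect_backwards_while_character := by
  intro s e0 mc _
  unfold Spec_collect_backwards_while_character collect_backwards_while_character collect_backwards_while_character_alt
  simp only []
  by_cases hg : -1 ≤ e0 ∧ e0 ≤ (s.toList.length : Int)
  · rw [if_pos hg, if_pos hg]
    set cs := s.toList with hcs
    set e : Int := if e0 = -1 then (cs.length : Int) else e0 with he
    have he0 : 0 ≤ e := by
      by_cases h1 : e0 = -1 <;> simp [he, h1]; omega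
    have hee : ((e.toNat : Int)) = e := Int.toNat_of_nonneg he0
    have hle : e.toNat ≤ cs.length := by
      by_cases h1 : e0 = -1
      · simp [he, h1]
      · have : e = e0 := by simp [he, h1]
        omega
    by_cases h1 : mc.toList.length = 1
    · obtain ⟨m, hm⟩ := List.length_eq_one_iff.mp h1
      rw [if_pos h1, hm]
      have hL := pvLoopA_single cs m e.toNat hle
      unfold pvRstripChars
      have hplen : (cs.take e.toNat).length = e.toNat := by
        simp [List.length_take, Nat.min_eq_left hle]
      have hdlen : ((cs.take e.toNat).reverse.dropWhile (fun c => c ∈ [m])).length ≤ e.toNat := by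
        calc ((cs.take e.toNat).reverse.dropWhile (fun c => c ∈ [m])).length
            ≤ (cs.take e.toNat).reverse.length := List.length_dropWhile_le _ _
          _ = e.toNat := by simp [hplen]
      rw [List.length_reverse, hL, hplen]
      simp only [Prod.mk.injEq, Option.some.injEq]
      constructor <;> omega
    · rw [if_neg h1]
      rw [pvLoopA_other cs mc.toList h1 e.toNat]
      simp only [Prod.mk.injEq, Option.some.injEq]
      constructor <;> omega
  · rw [if_neg hg, if_neg hg]
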